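-- pv_equiv track=rewrite | github.com/xju2/tracking-as-a-service | models/DoubleMetricLearning/3/client.py | labels_to_candidates
-- ===== SOURCE A (Python) =====
-- def labels_to_candidates(labels):
--     track_candidates = []
--     this_track = []
--     for sp_idx in labels:
--         if sp_idx == -1:
--             track_candidates.append(this_track)
--             this_track = []
--             continue
--         this_track.append(sp_idx)
--     return track_candidates
-- ===== SOURCE B (Python) =====
-- def labels_to_candidates(labels):
--     seps = [i for i, x in enumerate(labels) if x == -1]
--     out = []
--     start = 0
--     for p in seps:
--         out.append(labels[start:p])
--         start = p + 1
--     return out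
-- ===== Notes on version B (the rewrite author's own statement) =====
-- stated objective: alternative
-- what changed: B first collects the indices of all -1 separators in one pass, then builds the result by slicing labels between consecutive separators (dropping the tail after the last one), instead of A's single accumulator loop that appends elements to a running track.
import Mathlib
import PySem

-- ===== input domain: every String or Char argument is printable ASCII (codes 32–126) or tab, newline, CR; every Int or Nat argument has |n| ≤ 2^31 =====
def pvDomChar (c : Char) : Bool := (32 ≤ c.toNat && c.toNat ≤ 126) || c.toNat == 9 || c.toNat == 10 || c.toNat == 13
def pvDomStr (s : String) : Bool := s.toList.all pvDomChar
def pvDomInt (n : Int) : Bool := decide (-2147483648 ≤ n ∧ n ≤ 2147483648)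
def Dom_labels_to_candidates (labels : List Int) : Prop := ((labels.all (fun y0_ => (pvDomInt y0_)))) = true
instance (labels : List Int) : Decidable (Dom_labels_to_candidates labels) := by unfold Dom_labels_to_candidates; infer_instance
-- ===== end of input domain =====

-- B collects the -1 separator indices first and then slices labels between them (alternative decomposition, same cost).


-- ===== PORT A =====
def labels_to_candidates (labels : List Int) : List (List Int) :=
  (labels.foldl
    (fun (st : List (List Int) × List Int) sp_idx =>
      if sp_idx = -1 then (st.1 ++ [st.2], []) else (st.1, st.2 ++ [sp_idx]))
    (([] : List (List Int)), ([] : List Int))).1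

-- ===== PORT B =====
def labels_to_candidates_alt (labels : List Int) : List (List Int) :=
  let seps := ((PySem.List.enumerate labels 0).filter (fun p => p.2 == -1)).map (·.1)
  (seps.foldl
    (fun (st : List (List Int) × Int) p =>
      (st.1 ++ [PySem.List.slice labels (some st.2) (some p)], p + 1))
    (([] : List (List Int)), (0 : Int))).1

-- ===== PRECONDITION & SPEC =====
def Spec_labels_to_candidates (labels : List Int) (out : List (List Int)) : Prop := out = labels_to_candidates_alt labels
instance (labels : List Int) (out : List (List Int)) : Decidable (Spec_labels_to_candidates labels out) := by unfold Spec_labels_to_candidates; infer_instance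

-- ===== CLAIM (what is proved, stated in full; the proofs are below) =====
def Claim_equal_labels_to_candidates : Prop := ∀ (labels : List Int), Dom_labels_to_candidates labels → Spec_labels_to_candidates labels (labels_to_candidates labels)

-- ===== LEMMAS AND PROOFS =====

-- Reference splitter: A's result, computed structurally with the current track as accumulator.
def goA (cur : List Int) : List Int → List (List Int)
  | [] => []
  | x :: xs => if x = -1 then cur :: goA [] xs else goA (cur ++ [x]) xs

theorem foldA_eq_goA (l : List Int) (acc : List (List Int)) (cur : List Int) :
    (l.foldl
      (fun (st : List (List Int) × List Int) sp_idx =>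
        if sp_idx = -1 then (st.1 ++ [st.2], []) else (st.1, st.2 ++ [sp_idx]))
      (acc, cur)).1 = acc ++ goA cur l := by
  induction l generalizing acc cur with
  | nil => simp [goA]
  | cons x xs ih =>
    by_cases hx : x = -1 <;> simp [goA, hx, ih]

-- Positions of the -1 separators (as Int), starting from position k.
def sepIdxI (k : Int) : List Int → List Int
  | [] => []
  | x :: xs => if x = -1 then k :: sepIdxI (k+1) xs else sepIdxI (k+1) xs

theorem sepIdxI_sep (k : Int) (xs : List Int) :
    sepIdxI k ((-1) :: xs) = k :: sepIdxI (k+1) xs := by simp [sepIdxI]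

theorem sepIdxI_ne {x : Int} (hx : x ≠ -1) (k : Int) (xs : List Int) :
    sepIdxI k (x :: xs) = sepIdxI (k+1) xs := by simp [sepIdxI, hx]

theorem seps_eq (l : List Int) (k : Int) :
    ((PySem.List.enumerate l k).filter (fun p => p.2 == -1)).map (·.1)
      = sepIdxI k l := by
  induction l generalizing k with
  | nil => simp [PySem.List.enumerate_nil, sepIdxI]
  | cons x xs ih =>
    by_cases hx : x = -1 <;>
      simp [PySem.List.enumerate_cons, sepIdxI, hx, ih]

theorem foldB_eq_goA (rest pre : List Int) (acc : List (List Int)) (s : Nat)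
    (hs : s ≤ pre.length) :
    ((sepIdxI ((pre.length : Nat) : Int) rest).foldl
      (fun (st : List (List Int) × Int) p =>
        (st.1 ++ [PySem.List.slice (pre ++ rest) (some st.2) (some p)], p + 1))
      (acc, ((s : Nat) : Int))).1
      = acc ++ goA (((pre ++ rest).drop s).take (pre.length - s)) rest := by
  induction rest generalizing pre acc s with
  | nil => simp [sepIdxI, goA]
  | cons x xs ih =>
    by_cases hx : x = -1
    · subst hx
      rw [sepIdxI_sep, List.foldl_cons]
      have hone : (((pre.length : Nat) : Int) + 1) = (((pre.length + 1 : Nat)) : Int) := by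
        push_cast; ring
      have hslice : PySem.List.slice (pre ++ (-1) :: xs) (some ((s : Nat) : Int)) (some ((pre.length : Nat) : Int))
          = ((pre ++ (-1) :: xs).drop s).take (pre.length - s) := by
        rw [PySem.List.slice_natCast]
      have h := ih (pre ++ [-1]) (acc ++ [((pre ++ (-1) :: xs).drop s).take (pre.length - s)])
        (pre.length + 1) (by simp)
      simp only [List.append_assoc, List.singleton_append, List.length_append,
        List.length_cons, List.length_nil, Nat.zero_add] at h
      rw [hslice, hone, h]
      have h0 : ((pre ++ (-1) :: xs).drop (pre.length + 1)).take (pre.length + 1 - (pre.length + 1)) = [] := by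
        simp
      rw [h0]
      simp [goA]
    · rw [sepIdxI_ne hx]
      have hone : (((pre.length : Nat) : Int) + 1) = (((pre.length + 1 : Nat)) : Int) := by
        push_cast; ring
      have h := ih (pre ++ [x]) acc s (by simp; omega)
      simp only [List.append_assoc, List.singleton_append, List.length_append,
        List.length_cons, List.length_nil, Nat.zero_add] at h
      rw [hone, h]
      have hdrop : (pre ++ x :: xs).drop s = pre.drop s ++ x :: xs := by
        rw [List.drop_append_of_le_length hs]
      have hext : ((pre ++ x :: xs).drop s).take (pre.length + 1 - s)
          = ((pre ++ x :: xs).drop s).take (pre.length - s) ++ [x] := by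
        rw [hdrop]
        have h1 : pre.length + 1 - s = (pre.drop s).length + 1 := by simp; omega
        have h2 : pre.length - s = (pre.drop s).length + 0 := by simp
        rw [h1, h2, List.take_append, List.take_append]
        simp
      rw [hext]
      simp [goA, hx]

-- ===== VERDICT (by name: the statement is the Claim_ definition above) =====
theorem labels_to_candidates_spec : Claim_equal_labels_to_candidates := by
  intro labels _
  show labels_to_candidates labels = labels_to_candidates_alt labels
  unfold labels_to_candidates labels_to_candidates_alt
  rw [foldA_eq_goA]
  have hs : ((PySem.List.enumerate labels 0).filter (fun p => p.2 == -1)).map (·.1)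
      = sepIdxI (((List.length ([] : List Int)) : Nat) : Int) labels := by
    simpa using seps_eq labels 0
  rw [hs]
  have := foldB_eq_goA labels [] [] 0 (by simp)
  simpa using this.symm
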